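-- pv_equiv track=rewrite | github.com/VarunSharma3520/code | DSA Python/negative_left.py | separateNegativeAndPositive
-- ===== SOURCE A (Python) =====
-- def separateNegativeAndPositive(nums):
--     modified = False
--     found = False
--     for i in range(len(nums)):
--         if nums[i] > 0:
--             found = True
--         if nums[i] < 0 and found:
--             modified = True
--     if modified:
--         return 'Yes'
--     else:
--         return 'No'
-- ===== SOURCE B (Python) =====
-- def separateNegativeAndPositive(nums):
--     pos = [i for i, x in enumerate(nums) if x > 0]
--     neg = [i for i, x in enumerate(nums) if x < 0]
--     if pos and neg and pos[0] < neg[-1]: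
--         return 'Yes'
--     return 'No'
-- ===== Notes on version B (the rewrite author's own statement) =====
-- stated objective: alternative
-- what changed: Instead of A's single flag-carrying scan, B builds the index lists of positives and of negatives and answers by comparing the first positive index with the last negative index.
import Mathlib
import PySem

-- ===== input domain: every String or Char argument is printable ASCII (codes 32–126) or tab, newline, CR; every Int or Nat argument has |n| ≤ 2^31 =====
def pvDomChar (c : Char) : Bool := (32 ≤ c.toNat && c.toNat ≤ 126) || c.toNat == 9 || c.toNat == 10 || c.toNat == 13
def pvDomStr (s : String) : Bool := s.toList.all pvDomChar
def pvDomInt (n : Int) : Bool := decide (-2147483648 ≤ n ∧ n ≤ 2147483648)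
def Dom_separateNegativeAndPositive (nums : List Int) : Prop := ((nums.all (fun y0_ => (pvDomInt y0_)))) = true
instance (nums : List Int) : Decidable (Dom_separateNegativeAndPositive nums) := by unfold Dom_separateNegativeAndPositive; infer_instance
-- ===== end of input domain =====

-- B replaces A's flag-carrying scan by a position comparison: collect the indices of positives and of negatives and answer 'Yes' iff the first positive index precedes the last negative index (alternative decomposition, same cost).

-- ===== PORT A =====
-- the for-loop over range(len(nums)) reading nums[i] in order, ported as a fold over the elements with the same (modified, found) state
def separateNegativeAndPositive (nums : List Int) : String :=
  let st := nums.foldl (fun (st : Bool × Bool) x =>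
    let found := if x > 0 then true else st.2
    let modified := if x < 0 ∧ found = true then true else st.1
    (modified, found)) (false, false)
  if st.1 then "Yes" else "No"

-- ===== PORT B =====
-- enumerate(nums)
def pvEnumFrom : Nat → List Int → List (Nat × Int)
  | _, [] => []
  | k, x :: xs => (k, x) :: pvEnumFrom (k + 1) xs

-- pos/neg are the index comprehensions; pos[0] is head?, neg[-1] is getLast?; the truthiness tests 'pos and neg' are exactly the match on the two options
def separateNegativeAndPositive_alt (nums : List Int) : String :=
  let pos := ((pvEnumFrom 0 nums).filter (fun p => decide (p.2 > 0))).map (·.1)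
  let neg := ((pvEnumFrom 0 nums).filter (fun p => decide (p.2 < 0))).map (·.1)
  match pos.head?, neg.getLast? with
  | some p, some q => if p < q then "Yes" else "No"
  | _, _ => "No"

-- ===== PRECONDITION & SPEC =====
def Spec_separateNegativeAndPositive (nums : List Int) (out : String) : Prop := out = separateNegativeAndPositive_alt nums
instance (nums : List Int) (out : String) : Decidable (Spec_separateNegativeAndPositive nums out) := by unfold Spec_separateNegativeAndPositive; infer_instance

-- ===== CLAIM (what is proved, stated in full; the proofs are below) =====
def Claim_equal_separateNegativeAndPositive : Prop := ∀ (nums : List Int), Dom_separateNegativeAndPositive nums → Spec_separateNegativeAndPositive nums (separateNegativeAndPositive nums)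

-- ===== LEMMAS AND PROOFS =====

-- common structural form: 'some element after the first positive is negative'
def bcheck : List Int → Bool
  | [] => false
  | x :: xs => if x > 0 then xs.any (fun y => decide (y < 0)) else bcheck xs

-- first positive index / last negative index, recursively
def fpos : List Int → Nat → Option Nat
  | [], _ => none
  | x :: xs, k => if x > 0 then some k else fpos xs (k + 1)

def lneg : List Int → Nat → Option Nat
  | [], _ => none
  | x :: xs, k =>
    match lneg xs (k + 1) with
    | some j => some j
    | none => if x < 0 then some k else none

theorem fpos_shift (xs : List Int) (k : Nat) :
    fpos xs (k + 1) = (fpos xs k).map (· + 1) := by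
  induction xs generalizing k with
  | nil => rfl
  | cons x xs ih => simp only [fpos]; split <;> simp [ih]

theorem lneg_shift (xs : List Int) (k : Nat) :
    lneg xs (k + 1) = (lneg xs k).map (· + 1) := by
  induction xs generalizing k with
  | nil => rfl
  | cons x xs ih =>
    simp only [lneg, ih]
    cases lneg xs k <;> simp <;> split <;> simp

theorem lneg_none_iff (xs : List Int) (k : Nat) :
    lneg xs k = none ↔ xs.any (fun y => decide (y < 0)) = false := by
  induction xs generalizing k with
  | nil => simp [lneg]
  | cons x xs ih =>
    simp only [lneg, List.any_cons]
    cases h : lneg xs (k + 1) with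
    | some j =>
      have hb : xs.any (fun y => decide (y < 0)) = true := by
        cases hb' : xs.any (fun y => decide (y < 0))
        · rw [(ih (k+1)).mpr hb'] at h; simp at h
        · rfl
      simp [hb]
    | none => have := (ih (k+1)).mp h; simp [this]

theorem pos_head (xs : List Int) (k : Nat) :
    ((((pvEnumFrom k xs).filter (fun p => decide (p.2 > 0))).map (·.1)).head?) = fpos xs k := by
  induction xs generalizing k with
  | nil => rfl
  | cons x xs ih => simp only [pvEnumFrom, fpos, List.filter_cons]; split <;> simp_all

theorem neg_last (xs : List Int) (k : Nat) :
    ((((pvEnumFrom k xs).filter (fun p => decide (p.2 < 0))).map (·.1)).getLast?) = lneg xs k := by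
  induction xs generalizing k with
  | nil => rfl
  | cons x xs ih =>
    simp only [pvEnumFrom, lneg, List.filter_cons]
    by_cases hx : x < 0
    · simp only [hx, decide_true, if_pos trivial, List.map_cons, List.getLast?_cons, ih]
      cases h : lneg xs (k + 1) with
      | some j => simp [h]
      | none =>
        have : (((pvEnumFrom (k+1) xs).filter (fun p => decide (p.2 < 0))).map (·.1)) = [] := by
          cases hm : (((pvEnumFrom (k+1) xs).filter (fun p => decide (p.2 < 0))).map (·.1)) with
          | nil => rfl
          | cons a l =>
            exfalso
            have := ih (k := k + 1)
            rw [hm] at this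
            rw [h] at this
            simp [List.getLast?] at this
        simp [this]
    · rw [if_neg (by simp [hx]), ih]
      cases lneg xs (k + 1) <;> simp [hx]

theorem lneg_ge (xs : List Int) (k j : Nat) (h : lneg xs k = some j) : k ≤ j := by
  induction xs generalizing k with
  | nil => simp [lneg] at h
  | cons x xs ih =>
    simp only [lneg] at h
    cases hm : lneg xs (k + 1) with
    | some j' => rw [hm] at h; cases h; exact Nat.le_of_succ_le (ih (k + 1) hm)
    | none => rw [hm] at h; split at h <;> simp_all

theorem alt_eq_bcheck (nums : List Int) :
    separateNegativeAndPositive_alt nums = if bcheck nums then "Yes" else "No" := by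
  simp only [separateNegativeAndPositive_alt, pos_head, neg_last]
  induction nums with
  | nil => rfl
  | cons x xs ih =>
    simp only [fpos, lneg, bcheck]
    by_cases hx : x > 0
    · have hx' : ¬ x < 0 := by omega
      simp only [if_pos hx]
      cases h : lneg xs 1 with
      | none =>
        have h0 : lneg xs 0 = none := by
          have := lneg_shift xs 0; rw [h] at this
          cases h0 : lneg xs 0 <;> simp [h0] at this ⊢
        have := (lneg_none_iff xs 0).mp h0
        simp [hx', this]
      | some j =>
        have hj : 1 ≤ j := lneg_ge xs 1 j h
        have h0 : lneg xs 0 ≠ none := by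
          intro h0; rw [lneg_shift, h0] at h; simp at h
        have hneg : xs.any (fun y => decide (y < 0)) = true := by
          cases hb : xs.any (fun y => decide (y < 0))
          · exact absurd ((lneg_none_iff xs 0).mpr hb) h0
          · rfl
        simp [hneg, Nat.lt_of_lt_of_le Nat.zero_lt_one hj]
    · simp only [if_neg hx, fpos_shift]
      cases hp : fpos xs 0 with
      | none =>
        rw [hp] at ih
        have hb : bcheck xs = false := by
          by_contra hby
          simp at hby
          rw [hby] at ih
          cases lneg xs 0 <;> simp at ih
        cases lneg xs 1 <;> split <;> simp_all
      | some p =>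
        rw [hp] at ih
        rw [lneg_shift]
        cases hq : lneg xs 0 with
        | some j =>
          rw [hq] at ih
          simpa [Nat.succ_lt_succ_iff] using ih
        | none =>
          rw [hq] at ih
          have hb : bcheck xs = false := by
            by_contra hby; simp at hby; rw [hby] at ih; simp at ih
          by_cases hxn : x < 0 <;> simp [hxn, hb]

theorem loop_eq (xs : List Int) (m f : Bool) :
    (xs.foldl (fun (st : Bool × Bool) x =>
      let found := if x > 0 then true else st.2
      let modified := if x < 0 ∧ found = true then true else st.1
      (modified, found)) (m, f)).1
    = (m || (if f then xs.any (fun y => decide (y < 0)) else bcheck xs)) := by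
  induction xs generalizing m f with
  | nil => cases f <;> simp [bcheck]
  | cons x xs ih =>
    simp only [List.foldl, ih, bcheck, List.any_cons]
    by_cases hx : x > 0
    · have hx' : ¬ x < 0 := by omega
      cases f <;> simp [hx, hx']
    · by_cases hn : x < 0
      · cases f <;> cases m <;> simp [hx, hn] <;> cases hb : xs.any (fun y => decide (y < 0)) <;> simp
      · cases f <;> simp [hx, hn]

-- ===== VERDICT (by name: the statement is the Claim_ definition above) =====
theorem separateNegativeAndPositive_spec : Claim_equal_separateNegativeAndPositive := by
  intro nums _
  show _ = _
  rw [alt_eq_bcheck]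
  simp only [separateNegativeAndPositive]
  rw [loop_eq]
  simp
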